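-- pv_equiv track=rewrite | github.com/RyotaMaeno1227/OSS_CAE_FEM_salome | oldFile/legacy_root/tools/filter_ci_failures.py | extract_keyword_hits
-- ===== SOURCE A (Python) =====
-- from collections import deque
-- from typing import Iterable, List, Sequence
--
-- def extract_keyword_hits(lines: List[str], keywords: Iterable[str], context: int) -> List[str]:
--     keywords_lower = [keyword.lower() for keyword in keywords]
--     window: deque[str] = deque(maxlen=context)
--     snippets: List[str] = []
--     for line in lines:
--         lower = line.lower()
--         window.append(line)
--         if any(keyword in lower for keyword in keywords_lower):
--             snippets.extend(list(window))
--             snippets.append("\n")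
--             window.clear()
--     return snippets
-- ===== SOURCE B (Python) =====
-- def extract_keyword_hits(lines, keywords, context):
--     keywords_lower = [keyword.lower() for keyword in keywords]
--     hits = [i for i, line in enumerate(lines)
--             if any(keyword in line.lower() for keyword in keywords_lower)]
--     snippets = []
--     start = 0
--     for i in hits:
--         snippets.extend(lines[max(start, i - context + 1):i + 1])
--         snippets.append("\n")
--         start = i + 1
--     return snippets
-- ===== Notes on version B (the rewrite author's own statement) =====
-- stated objective: alternative
-- what changed: Instead of maintaining a bounded deque that is appended to on every line and cleared on each hit, B first collects the indices of all matching lines in one scan, then emits each context window as a slice lines[max(start, i-context+1):i+1] while advancing a start cursor past each flushed hit.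
import Mathlib
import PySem

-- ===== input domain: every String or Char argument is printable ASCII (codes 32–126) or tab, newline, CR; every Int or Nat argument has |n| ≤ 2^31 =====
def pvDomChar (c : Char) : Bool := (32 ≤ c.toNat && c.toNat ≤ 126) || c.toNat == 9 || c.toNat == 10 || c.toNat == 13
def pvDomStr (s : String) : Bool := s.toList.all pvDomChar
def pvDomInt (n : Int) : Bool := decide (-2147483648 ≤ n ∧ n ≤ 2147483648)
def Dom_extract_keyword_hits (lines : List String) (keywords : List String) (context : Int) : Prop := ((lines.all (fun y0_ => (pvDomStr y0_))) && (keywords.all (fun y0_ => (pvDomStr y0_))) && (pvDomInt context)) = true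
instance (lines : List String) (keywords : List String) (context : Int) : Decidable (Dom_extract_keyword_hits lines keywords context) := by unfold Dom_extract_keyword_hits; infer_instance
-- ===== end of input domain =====

-- B replaces A's per-line bounded deque by a two-pass scheme (collect hit indices, then emit
-- slices with a start cursor): a genuinely different decomposition, not measurably faster.

-- `any(keyword in lower for keyword in keywords_lower)` — identical expression in both sources
def pvHit (keywords_lower : List String) (lower : String) : Bool :=
  keywords_lower.any (fun keyword => PySem.Str.isIn keyword lower)

-- ===== PORT A =====
-- loop body of A; `window.append(line)` on deque(maxlen=context) keeps the last `context`
-- elements (negative context makes the deque constructor raise; excluded by Pre_)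
def pvStepA (keywords_lower : List String) (context : Int)
    (st : List String × List String) (line : String) : List String × List String :=
  let lower := PySem.Str.lower line
  let window := (st.1 ++ [line]).drop (st.1.length + 1 - context.toNat)
  if pvHit keywords_lower lower then ([], st.2 ++ window ++ ["\n"])
  else (window, st.2)

def extract_keyword_hits (lines : List String) (keywords : List String) (context : Int) : List String :=
  let keywords_lower := keywords.map (fun keyword => PySem.Str.lower keyword)
  (lines.foldl (pvStepA keywords_lower context) ([], [])).2

-- ===== PORT B =====
-- loop body of B's second pass: emit lines[max(start, i-context+1):i+1] and "\n", start := i+1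
def pvStepB (lines : List String) (context : Int) (st : Int × List String) (i : Int) : Int × List String :=
  (i + 1, st.2 ++ PySem.List.slice lines (some (max st.1 (i - context + 1))) (some (i + 1)) ++ ["\n"])

def extract_keyword_hits_alt (lines : List String) (keywords : List String) (context : Int) : List String :=
  let keywords_lower := keywords.map (fun keyword => PySem.Str.lower keyword)
  let hits := (PySem.List.enumerate lines 0).filterMap
    (fun q => if pvHit keywords_lower (PySem.Str.lower q.2) then some q.1 else none)
  (hits.foldl (pvStepB lines context) (0, [])).2

-- ===== PRECONDITION & SPEC =====
-- Pre_ excludes only negative context, where A raises ValueError (deque(maxlen=context)).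
def Pre_extract_keyword_hits (lines : List String) (keywords : List String) (context : Int) : Prop :=
  0 ≤ context
instance (lines : List String) (keywords : List String) (context : Int) : Decidable (Pre_extract_keyword_hits lines keywords context) := by unfold Pre_extract_keyword_hits; infer_instance

def pvWitness_extract_keyword_hits : List String × List String × Int :=
  (["boot ok", "ERROR: boom", "trace"], ["error"], 1)

def Spec_extract_keyword_hits (lines : List String) (keywords : List String) (context : Int) (out : List String) : Prop := out = extract_keyword_hits_alt lines keywords context
instance (lines : List String) (keywords : List String) (context : Int) (out : List String) : Decidable (Spec_extract_keyword_hits lines keywords context out) := by unfold Spec_extract_keyword_hits; infer_instance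

-- ===== CLAIM (what is proved, stated in full; the proofs are below) =====
def Claim_equal_extract_keyword_hits : Prop := ∀ (lines : List String) (keywords : List String) (context : Int), Dom_extract_keyword_hits lines keywords context → Pre_extract_keyword_hits lines keywords context → Spec_extract_keyword_hits lines keywords context (extract_keyword_hits lines keywords context)

-- ===== LEMMAS AND PROOFS =====

lemma pvStepA_hit (kwsl : List String) (context : Int) (w snip : List String)
    (line : String) (hp : pvHit kwsl (PySem.Str.lower line) = true) :
    pvStepA kwsl context (w, snip) line
      = ([], snip ++ (w ++ [line]).drop (w.length + 1 - context.toNat) ++ ["\n"]) := by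
  simp [pvStepA, hp]

lemma pvStepA_miss (kwsl : List String) (context : Int) (w snip : List String)
    (line : String) (hp : ¬ pvHit kwsl (PySem.Str.lower line) = true) :
    pvStepA kwsl context (w, snip) line
      = ((w ++ [line]).drop (w.length + 1 - context.toNat), snip) := by
  simp [pvStepA, hp]

-- the deque window after consuming lines[:idx] with last flush at `start`
-- is (lines.take idx).drop (max start (idx - context)); appending lines[idx] advances idx.
lemma pv_window_step (lines : List String) (c idx start : ℕ)
    (hs : start ≤ idx) (hlt : idx < lines.length) :
    (((lines.take idx).drop (max start (idx - c)) ++ [lines[idx]]).drop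
        (((lines.take idx).drop (max start (idx - c))).length + 1 - c))
      = (lines.take (idx + 1)).drop (max start (idx + 1 - c)) := by
  have hlen : (lines.take idx).length = idx := by
    rw [List.length_take]; omega
  have hm : max start (idx - c) ≤ (lines.take idx).length := by omega
  have htake : lines.take (idx + 1) = lines.take idx ++ [lines[idx]] := by
    rw [List.take_succ, List.getElem?_eq_getElem hlt]; rfl
  rw [← List.drop_append_of_le_length hm, List.drop_drop, List.length_drop, hlen, htake]
  congr 1
  omega

-- B's slice for a hit at idx is exactly A's window content there.
lemma pv_slice_eq (lines : List String) (context : Int) (hc : 0 ≤ context)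
    (idx start : ℕ) (hs : start ≤ idx) :
    PySem.List.slice lines (some (max (start : Int) ((idx : Int) - context + 1))) (some ((idx : Int) + 1))
      = (lines.take (idx + 1)).drop (max start (idx + 1 - context.toNat)) := by
  have hmax : max (start : Int) ((idx : Int) - context + 1)
      = ((max start (idx + 1 - context.toNat) : ℕ) : Int) := by
    omega
  have hone : ((idx : Int) + 1) = (((idx + 1 : ℕ)) : Int) := by push_cast; ring
  rw [hmax, hone, PySem.List.slice_natCast, List.drop_take]

-- loop correspondence: A's fold over the remaining lines with the current window equals
-- B's fold over the remaining hit indices with the current start cursor.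
lemma pv_main (kwsl lines : List String) (context : Int) (hc : 0 ≤ context) :
    ∀ (rest : List String) (idx start : ℕ) (snip : List String),
    start ≤ idx → rest = lines.drop idx →
    (rest.foldl (pvStepA kwsl context)
        ((lines.take idx).drop (max start (idx - context.toNat)), snip)).2
    = (((PySem.List.enumerate rest (idx : Int)).filterMap
          (fun q => if pvHit kwsl (PySem.Str.lower q.2) then some q.1 else none)).foldl
        (pvStepB lines context) ((start : Int), snip)).2 := by
  intro rest
  induction rest with
  | nil => intro idx start snip _ _; simp [PySem.List.enumerate_nil]
  | cons line rest' ih =>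
    intro idx start snip hs hdrop
    have hlt : idx < lines.length := by
      by_contra h
      rw [List.drop_eq_nil_of_le (by omega)] at hdrop
      simp at hdrop
    rw [List.drop_eq_getElem_cons hlt] at hdrop
    obtain ⟨hline, hrest⟩ := List.cons_eq_cons.mp hdrop
    subst hline
    rw [PySem.List.enumerate_cons]
    have hwin := pv_window_step lines context.toNat idx start hs hlt
    have hone : ((idx : Int) + 1) = (((idx + 1 : ℕ)) : Int) := by push_cast; ring
    by_cases hp : pvHit kwsl (PySem.Str.lower lines[idx]) = true
    · -- hit: flush the window, clear it, start := idx + 1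
      have hfm : List.filterMap
            (fun q : Int × String => if pvHit kwsl (PySem.Str.lower q.2) then some q.1 else none)
            (((idx : Int), lines[idx]) :: PySem.List.enumerate rest' ((idx : Int) + 1))
          = (idx : Int) :: List.filterMap
              (fun q : Int × String => if pvHit kwsl (PySem.Str.lower q.2) then some q.1 else none)
              (PySem.List.enumerate rest' ((idx : Int) + 1)) := by
        simp [hp]
      have hB : pvStepB lines context ((start : Int), snip) (idx : Int)
          = (((idx + 1 : ℕ) : Int),
             snip ++ (lines.take (idx + 1)).drop (max start (idx + 1 - context.toNat)) ++ ["\n"]) := by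
        unfold pvStepB
        rw [pv_slice_eq lines context hc idx start hs, hone]
      have hempty : ([] : List String)
          = (lines.take (idx + 1)).drop (max (idx + 1) (idx + 1 - context.toNat)) := by
        rw [eq_comm]
        apply List.drop_eq_nil_of_le
        rw [List.length_take]; omega
      rw [hfm, List.foldl_cons, List.foldl_cons,
          pvStepA_hit kwsl context _ _ _ hp, hwin, hB, hempty, hone]
      exact ih (idx + 1) (idx + 1) _ (le_refl _) hrest
    · -- no hit: the window slides, start stays
      have hfm : List.filterMap
            (fun q : Int × String => if pvHit kwsl (PySem.Str.lower q.2) then some q.1 else none)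
            (((idx : Int), lines[idx]) :: PySem.List.enumerate rest' ((idx : Int) + 1))
          = List.filterMap
              (fun q : Int × String => if pvHit kwsl (PySem.Str.lower q.2) then some q.1 else none)
              (PySem.List.enumerate rest' ((idx : Int) + 1)) := by
        simp [hp]
      rw [hfm, List.foldl_cons, pvStepA_miss kwsl context _ _ _ hp, hwin, hone]
      exact ih (idx + 1) start snip (by omega) hrest

-- ===== VERDICT (by name: the statement is the Claim_ definition above) =====
theorem extract_keyword_hits_spec : Claim_equal_extract_keyword_hits := by
  intro lines keywords context _ hpre
  unfold Spec_extract_keyword_hits extract_keyword_hits extract_keyword_hits_alt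
  have h := pv_main (keywords.map (fun keyword => PySem.Str.lower keyword)) lines context hpre
    lines 0 0 [] (le_refl 0) (by simp)
  simpa using h
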